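-- pv_equiv track=rewrite | github.com/razroo/codemaximus | src/codemaximus/generator.py | truncate_content_to_newlines
-- ===== SOURCE A (Python) =====
-- def truncate_content_to_newlines(content: str, n: int) -> str:
--     """Keep a prefix of `content` that contains exactly `n` newline characters (or all content if shorter)."""
--     if n <= 0:
--         return ""
--     pos = -1
--     for _ in range(n):
--         pos = content.find("\n", pos + 1)
--         if pos == -1:
--             return content
--     return content[: pos + 1]
-- ===== SOURCE B (Python) =====
-- def truncate_content_to_newlines(content: str, n: int) -> str:
--     """Keep a prefix of `content` that contains exactly `n` newline characters (or all content if shorter)."""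
--     if n <= 0:
--         return ""
--     parts = content.split("\n")
--     if len(parts) - 1 < n:
--         return content
--     return "\n".join(parts[:n]) + "\n"
-- ===== Notes on version B (the rewrite author's own statement) =====
-- stated objective: idiomatic
-- what changed: Replaces A's incremental find-loop (repeated str.find from the last hit) with a single split on newline followed by a count check and a rejoin of the first n segments.
import Mathlib
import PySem

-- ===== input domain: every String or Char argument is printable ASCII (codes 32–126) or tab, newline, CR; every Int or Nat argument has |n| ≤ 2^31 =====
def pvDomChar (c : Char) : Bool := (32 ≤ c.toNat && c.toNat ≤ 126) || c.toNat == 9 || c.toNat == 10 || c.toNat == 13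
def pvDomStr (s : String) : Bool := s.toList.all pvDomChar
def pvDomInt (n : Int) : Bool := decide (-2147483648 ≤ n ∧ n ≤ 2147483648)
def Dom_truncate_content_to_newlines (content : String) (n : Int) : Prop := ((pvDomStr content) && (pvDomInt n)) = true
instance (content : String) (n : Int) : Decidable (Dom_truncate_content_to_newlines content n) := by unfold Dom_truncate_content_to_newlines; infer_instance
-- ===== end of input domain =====

-- B replaces A's incremental find-loop with a single split on "\n", a count check, and a rejoin of the first n segments (idiomatic; same asymptotic cost).


-- ===== PORT A =====
-- A's loop 'for _ in range(n): pos = content.find("\n", pos + 1); if pos == -1: return content',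
-- transcribed as structural recursion on the remaining iteration count; falling off the loop returns content[: pos + 1].
def truncateGoA (cs : List Char) : Nat → Int → List Char
  | 0, pos => PySem.List.slice cs none (some (pos + 1))          -- content[: pos + 1]
  | fuel + 1, pos =>
    let p := PySem.Chars.findFrom cs ['\n'] (pos + 1)            -- content.find("\n", pos + 1)
    if p = -1 then cs else truncateGoA cs fuel p

def truncate_content_to_newlines (content : String) (n : Int) : String :=
  if n ≤ 0 then "" else String.ofList (truncateGoA content.toList n.toNat (-1))

-- ===== PORT B =====
def truncate_content_to_newlines_alt (content : String) (n : Int) : String :=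
  if n ≤ 0 then ""
  else
    let parts := PySem.Chars.splitOn content.toList ['\n']       -- content.split("\n")
    if (parts.length : Int) - 1 < n then content
    else String.ofList (PySem.Chars.join ['\n'] (PySem.List.slice parts none (some n)) ++ ['\n'])  -- "\n".join(parts[:n]) + "\n"

-- ===== PRECONDITION & SPEC =====
def Spec_truncate_content_to_newlines (content : String) (n : Int) (out : String) : Prop := out = truncate_content_to_newlines_alt content n
instance (content : String) (n : Int) (out : String) : Decidable (Spec_truncate_content_to_newlines content n out) := by unfold Spec_truncate_content_to_newlines; infer_instance

-- ===== CLAIM (what is proved, stated in full; the proofs are below) =====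
def Claim_equal_truncate_content_to_newlines : Prop := ∀ (content : String) (n : Int), Dom_truncate_content_to_newlines content n → Spec_truncate_content_to_newlines content n (truncate_content_to_newlines content n)

-- ===== LEMMAS AND PROOFS =====

-- Reference: the prefix of cs through the m-th newline (all of cs if it has fewer than m newlines).
def pvRef : Nat → List Char → List Char
  | 0, _ => []
  | _ + 1, [] => []
  | m + 1, c :: rest => if c = '\n' then c :: pvRef m rest else c :: pvRef (m + 1) rest

theorem pvRef_no_newline (m : Nat) (suf : List Char) (h : '\n' ∉ suf) : pvRef (m + 1) suf = suf := by
  induction suf with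
  | nil => rfl
  | cons c rest ih =>
    have hc : c ≠ '\n' := fun hc => h (hc ▸ List.mem_cons_self)
    simp [pvRef, hc, ih (fun hm => h (List.mem_cons_of_mem _ hm))]

theorem pvRef_jump (s0 : List Char) (h : '\n' ∉ s0) (m : Nat) (rest : List Char) :
    pvRef (m + 1) (s0 ++ '\n' :: rest) = s0 ++ '\n' :: pvRef m rest := by
  induction s0 with
  | nil => simp [pvRef]
  | cons c s0' ih =>
    have hc : c ≠ '\n' := fun hc => h (hc ▸ List.mem_cons_self)
    simp [pvRef, hc, ih (fun hm => h (List.mem_cons_of_mem _ hm))]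

-- the A-side loop invariant: with the scan standing just past `pre`, the loop yields `pre` plus the reference prefix of the remaining suffix
theorem truncateGoA_eq_pvRef (fuel : Nat) :
    ∀ (pre suf : List Char), truncateGoA (pre ++ suf) fuel ((pre.length : Int) - 1) = pre ++ pvRef fuel suf := by
  induction fuel with
  | zero =>
    intro pre suf
    show PySem.List.slice (pre ++ suf) none (some ((pre.length : Int) - 1 + 1)) = pre ++ pvRef 0 suf
    have h1 : ((pre.length : Int) - 1 + 1) = (pre.length : Int) := by ring
    rw [h1, PySem.List.slice_to_natCast, List.take_left]
    simp [pvRef]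
  | succ fuel ih =>
    intro pre suf
    have h1 : ((pre.length : Int) - 1 + 1) = (pre.length : Int) := by ring
    have hk : pre.length ≤ (pre ++ suf).length := by simp
    show (if PySem.Chars.findFrom (pre ++ suf) ['\n'] ((pre.length : Int) - 1 + 1) = -1
          then (pre ++ suf)
          else truncateGoA (pre ++ suf) fuel (PySem.Chars.findFrom (pre ++ suf) ['\n'] ((pre.length : Int) - 1 + 1)))
        = pre ++ pvRef (fuel + 1) suf
    rw [h1, PySem.Chars.findFrom_natCast _ _ pre.length hk, List.drop_left]
    by_cases hj : PySem.Chars.find suf ['\n'] = -1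
    · rw [if_pos (by rw [hj]; simp)]
      have hnn : '\n' ∉ suf := by
        intro hm
        exact ((PySem.Chars.find_eq_neg_one_iff suf ['\n']).mp hj) ((List.singleton_infix_iff _ _).mpr hm)
      rw [pvRef_no_newline fuel suf hnn]
    · rw [if_neg (by rw [if_neg hj]; have := PySem.Chars.neg_one_le_find suf ['\n']; omega)]
      rw [if_neg hj]
      have hj0 : 0 ≤ PySem.Chars.find suf ['\n'] := by
        have := PySem.Chars.neg_one_le_find suf ['\n']; omega
      obtain ⟨hpre, hmin⟩ := PySem.Chars.find_spec hj0
      set j : Nat := (PySem.Chars.find suf ['\n']).toNat with hjdef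
      have hjcast : PySem.Chars.find suf ['\n'] = (j : Int) := by omega
      obtain ⟨t, ht⟩ := hpre
      have hdropj : suf.drop j = '\n' :: t := by simpa using ht.symm
      have hjlen : j < suf.length := by
        by_contra hge
        rw [List.drop_eq_nil_of_le (by omega)] at hdropj
        exact (List.cons_ne_nil _ _) hdropj.symm
      have htdrop : t = suf.drop (j + 1) := by
        have : suf.drop (j + 1) = (suf.drop j).drop 1 := by
          rw [List.drop_drop]
        rw [this, hdropj]
        rfl
      have hsuf : suf = suf.take j ++ '\n' :: suf.drop (j + 1) := by
        conv_lhs => rw [← List.take_append_drop j suf]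
        rw [hdropj, htdrop]
      have hs0 : '\n' ∉ suf.take j := by
        intro hm
        obtain ⟨i, hi, hgi⟩ := List.mem_iff_getElem.mp hm
        have hij : i < j := by
          have := hi
          simp [List.length_take] at this
          omega
        have hisuf : i < suf.length := by omega
        have hgi' : suf[i] = '\n' := by
          rw [List.getElem_take] at hgi
          exact hgi
        apply hmin i hij
        exact ⟨suf.drop (i + 1), by simp [List.drop_eq_getElem_cons hisuf, hgi']⟩
      have hplen : (pre ++ suf.take j ++ ['\n']).length = pre.length + j + 1 := by
        simp [List.length_take]
        omega
      have harg : (pre.length : Int) + PySem.Chars.find suf ['\n']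
          = ((pre ++ suf.take j ++ ['\n']).length : Int) - 1 := by
        rw [hplen, hjcast]; push_cast; ring
      have hcat : (pre ++ suf.take j ++ ['\n']) ++ suf.drop (j + 1) = pre ++ suf := by
        conv_rhs => rw [hsuf]
        simp
      rw [harg, ← hcat, ih (pre ++ suf.take j ++ ['\n']) (suf.drop (j + 1))]
      conv_rhs => rw [hsuf]
      rw [pvRef_jump (suf.take j) hs0]
      simp

-- equation lemmas for PySem.Chars.splitOn.go with a one-character separator
theorem splitOn_go_nil (fuel : Nat) (cur : List Char) (acc : List (List Char)) :
    PySem.Chars.splitOn.go ['\n'] fuel [] cur acc = (cur.reverse :: acc).reverse := by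
  cases fuel <;> simp [PySem.Chars.splitOn.go]

theorem splitOn_go_cons (fuel : Nat) (c : Char) (rest cur : List Char) (acc : List (List Char)) :
    PySem.Chars.splitOn.go ['\n'] (fuel + 1) (c :: rest) cur acc =
      if c = '\n' then PySem.Chars.splitOn.go ['\n'] fuel rest [] (cur.reverse :: acc)
      else PySem.Chars.splitOn.go ['\n'] fuel rest (c :: cur) acc := by
  by_cases hc : c = '\n' <;> simp [PySem.Chars.splitOn.go, List.isPrefixOf, hc]
  exact fun h => absurd h.symm hc

theorem splitOn_go_spec (l : List Char) : ∀ (fuel : Nat), l.length ≤ fuel → ∀ (cur : List Char) (acc : List (List Char)),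
    PySem.Chars.splitOn.go ['\n'] fuel l cur acc
      = acc.reverse ++ (l.splitOnP (· == '\n')).modifyHead (cur.reverse ++ ·) := by
  induction l with
  | nil =>
    intro fuel _ cur acc
    rw [splitOn_go_nil]
    simp [List.splitOnP_nil, List.modifyHead]
  | cons c rest ih =>
    intro fuel hf cur acc
    obtain ⟨f, rfl⟩ : ∃ f, fuel = f + 1 := ⟨fuel - 1, by simp at hf; omega⟩
    rw [splitOn_go_cons]
    have hr : rest.length ≤ f := by simp at hf; omega
    obtain ⟨p, ps, hps⟩ : ∃ p ps, rest.splitOnP (· == '\n') = p :: ps := by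
      cases h : rest.splitOnP (· == '\n') with
      | nil => exact absurd h (List.splitOnP_ne_nil _ _)
      | cons p ps => exact ⟨p, ps, rfl⟩
    by_cases hc : c = '\n'
    · rw [if_pos hc, ih f hr]
      simp [List.splitOnP_cons, hc, hps, List.modifyHead]
    · rw [if_neg hc, ih f hr]
      simp [List.splitOnP_cons, hc, hps, List.modifyHead]

theorem splitOn_eq_splitOnP (cs : List Char) :
    PySem.Chars.splitOn cs ['\n'] = cs.splitOnP (· == '\n') := by
  have h := splitOn_go_spec cs (cs.length + 1) (by omega) [] []
  simp only [PySem.Chars.splitOn, h, List.reverse_nil, List.nil_append]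
  cases cs.splitOnP (· == '\n') <;> simp [List.modifyHead]

theorem join_cons_head (c : Char) (p : List Char) (t : List (List Char)) :
    PySem.Chars.join ['\n'] ((c :: p) :: t) = c :: PySem.Chars.join ['\n'] (p :: t) := by
  cases t with
  | nil => simp [PySem.Chars.join_singleton]
  | cons q t' => simp [PySem.Chars.join_cons_cons]

-- the B-side formula equals the reference, for m ≥ 1
theorem altBody_eq_pvRef (cs : List Char) : ∀ (m : Nat), 1 ≤ m →
    (if ((cs.splitOnP (· == '\n')).length : Int) - 1 < (m : Int) then cs
     else PySem.Chars.join ['\n'] ((cs.splitOnP (· == '\n')).take m) ++ ['\n']) = pvRef m cs := by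
  induction cs with
  | nil =>
    intro m hm
    obtain ⟨m', rfl⟩ : ∃ m', m = m' + 1 := ⟨m - 1, by omega⟩
    rw [if_pos (by simp [List.splitOnP_nil])]
    rfl
  | cons c rest ih =>
    intro m hm
    obtain ⟨m', rfl⟩ : ∃ m', m = m' + 1 := ⟨m - 1, by omega⟩
    obtain ⟨p, ps, hps⟩ : ∃ p ps, rest.splitOnP (· == '\n') = p :: ps := by
      cases h : rest.splitOnP (· == '\n') with
      | nil => exact absurd h (List.splitOnP_ne_nil _ _)
      | cons p ps => exact ⟨p, ps, rfl⟩
    by_cases hc : c = '\n'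
    · have hsplit : (c :: rest).splitOnP (· == '\n') = [] :: p :: ps := by
        simp [List.splitOnP_cons, hc, hps]
      rw [hsplit]
      have href : pvRef (m' + 1) (c :: rest) = c :: pvRef m' rest := by
        simp [pvRef, hc]
      rw [href]
      cases m' with
      | zero =>
        rw [if_neg (by simp)]
        simp [hc, PySem.Chars.join_singleton, pvRef]
      | succ k =>
        have ihr := ih (k + 1) (by omega)
        rw [hps] at ihr
        by_cases hcond : (((p :: ps) : List (List Char)).length : Int) - 1 < ((k + 1 : Nat) : Int)
        · rw [if_pos (by push_cast at hcond ⊢; simp at hcond ⊢; omega)]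
          rw [if_pos hcond] at ihr
          rw [← ihr, hc]
        · rw [if_neg (by push_cast at hcond ⊢; simp at hcond ⊢; omega)]
          rw [if_neg hcond] at ihr
          rw [List.take_succ_cons, List.take_succ_cons] at *
          rw [PySem.Chars.join_cons_cons]
          rw [← ihr, hc]
          simp
    · have hsplit : (c :: rest).splitOnP (· == '\n') = (c :: p) :: ps := by
        simp [List.splitOnP_cons, hc, hps, List.modifyHead]
      rw [hsplit]
      have href : pvRef (m' + 1) (c :: rest) = c :: pvRef (m' + 1) rest := by
        simp [pvRef, hc]
      rw [href]
      have ihr := ih (m' + 1) (by omega)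
      rw [hps] at ihr
      by_cases hcond : (((p :: ps) : List (List Char)).length : Int) - 1 < ((m' + 1 : Nat) : Int)
      · rw [if_pos (by simpa using hcond)]
        rw [if_pos hcond] at ihr
        exact congrArg (c :: ·) ihr
      · rw [if_neg (by simpa using hcond)]
        rw [if_neg hcond] at ihr
        rw [List.take_succ_cons, join_cons_head]
        rw [List.take_succ_cons] at ihr
        rw [← ihr]
        simp

-- ===== VERDICT (by name: the statement is the Claim_ definition above) =====
theorem truncate_content_to_newlines_spec : Claim_equal_truncate_content_to_newlines := by
  intro content n _
  unfold Spec_truncate_content_to_newlines truncate_content_to_newlines truncate_content_to_newlines_alt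
  by_cases hn : n ≤ 0
  · simp [hn]
  · obtain ⟨m, rfl⟩ : ∃ m : Nat, n = (m : Int) := ⟨n.toNat, by omega⟩
    have hm : 1 ≤ m := by exact_mod_cast not_le.mp hn
    have hA := truncateGoA_eq_pvRef m [] content.toList
    simp only [List.nil_append, List.length_nil, Nat.cast_zero, zero_sub] at hA
    simp only [hn, if_false, splitOn_eq_splitOnP, PySem.List.slice_to_natCast, Int.toNat_natCast, hA]
    rw [← altBody_eq_pvRef content.toList m hm]
    split
    · exact String.ofList_toList
    · rfl
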